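-- pv_equiv track=rewrite | github.com/liskos/isakovich2023 | ege05/297.py | f
-- ===== SOURCE A (Python) =====
-- def f(n):
--     s1 = 0
--     s2 = 0
--     for i in str(n)[::2]:
--         x = int(i)*2
--         if x > 9:
--             s1 += x % 10 + x // 10
--         else:
--             s1 += x
--     for i in str(n)[1::2]:
--         s2 += int(i)
--     return s1 + s2
-- ===== SOURCE B (Python) =====
-- def f(n):
--     total = 0
--     for idx, ch in enumerate(str(n)):
--         d = int(ch)
--         if idx % 2 == 0:
--             x = d * 2
--             total += x - 9 if x > 9 else x
--         else:
--             total += d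
--     return total
-- ===== Notes on version B (the rewrite author's own statement) =====
-- stated objective: simpler
-- what changed: Replaces A's two slice-driven passes (str(n)[::2] doubled-and-folded, str(n)[1::2] summed into two accumulators) with one enumerate pass over str(n) branching on index parity into a single running total, using x-9 instead of x%10+x//10 to fold a doubled digit.
import Mathlib
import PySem

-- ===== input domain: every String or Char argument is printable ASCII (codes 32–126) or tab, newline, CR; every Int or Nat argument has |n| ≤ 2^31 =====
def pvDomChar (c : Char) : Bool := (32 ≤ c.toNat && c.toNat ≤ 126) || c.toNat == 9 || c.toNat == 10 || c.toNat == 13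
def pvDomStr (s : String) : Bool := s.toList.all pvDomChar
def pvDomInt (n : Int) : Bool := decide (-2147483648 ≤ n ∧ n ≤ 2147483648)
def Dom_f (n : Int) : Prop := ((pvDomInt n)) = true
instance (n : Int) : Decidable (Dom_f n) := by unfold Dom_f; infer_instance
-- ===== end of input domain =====

-- B replaces A's two slice passes (str(n)[::2] and str(n)[1::2]) with a single
-- enumerate pass branching on index parity into one running total (objective: simpler).


-- ===== PORT A =====
-- int(ch) for a single character via the PySem primitive; the none case (ValueError)
-- is defaulted to 0, never reached inside Pre_f (all characters of str(n) are digits for 0 ≤ n).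
def pvIntOf (c : Char) : Int := (PySem.Int.ofChars? [c]).getD 0

def f (n : Int) : Int :=
  let s1 : Int := ((PySem.List.slice? (PySem.Int.toStr n).toList none none 2).getD []).foldl
    (fun s1 i =>
      let x := pvIntOf i * 2
      if x > 9 then s1 + (PySem.Int.mod x 10 + PySem.Int.floordiv x 10) else s1 + x) 0
  let s2 : Int := ((PySem.List.slice? (PySem.Int.toStr n).toList (some 1) none 2).getD []).foldl
    (fun s2 i => s2 + pvIntOf i) 0
  s1 + s2

-- ===== PORT B =====
def f_alt (n : Int) : Int :=
  (PySem.List.enumerate (PySem.Int.toStr n).toList 0).foldl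
    (fun total p =>
      let d := pvIntOf p.2
      if PySem.Int.mod p.1 2 = 0 then
        let x := d * 2
        total + (if x > 9 then x - 9 else x)
      else
        total + d) 0

-- ===== PRECONDITION & SPEC =====
-- Pre_f excludes exactly the inputs where A raises: for n < 0, str(n) contains '-', and
-- int() on a slice character that is (or is paired with) '-' raises ValueError (B raises too).
def Pre_f (n : Int) : Prop := 0 ≤ n
instance (n : Int) : Decidable (Pre_f n) := by unfold Pre_f; infer_instance

def pvWitness_f : Int := 12345

def Spec_f (n : Int) (out : Int) : Prop := out = f_alt n
instance (n : Int) (out : Int) : Decidable (Spec_f n out) := by unfold Spec_f; infer_instance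

-- ===== CLAIM (what is proved, stated in full; the proofs are below) =====
def Claim_equal_f : Prop := ∀ (n : Int), Dom_f n → Pre_f n → Spec_f n (f n)

-- ===== LEMMAS AND PROOFS =====

-- every other element starting from the head (Python xs[::2])
def pvEvens {α : Type} : List α → List α
  | [] => []
  | [a] => [a]
  | a :: _ :: r => a :: pvEvens r

lemma filterMap_range_evens {α : Type} : ∀ (xs : List α),
    (List.range ((xs.length + 1) / 2)).filterMap (fun k => xs[2 * k]?) = pvEvens xs := by
  intro xs
  induction xs using pvEvens.induct with
  | case1 => simp [pvEvens]
  | case2 a => simp [pvEvens]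
  | case3 a b r ih =>
    have hm : ((a :: b :: r).length + 1) / 2 = (r.length + 1) / 2 + 1 := by
      simp only [List.length_cons]; omega
    rw [hm, List.range_succ_eq_map, List.filterMap_cons]
    simp only [Nat.mul_zero, List.getElem?_cons_zero, List.filterMap_map, Function.comp_def]
    have h2 : ∀ k : Nat, (a :: b :: r)[2 * (k + 1)]? = r[2 * k]? := by
      intro k
      have : 2 * (k + 1) = 2 * k + 1 + 1 := by ring
      simp [this]
    simp only [Nat.succ_eq_add_one, h2]
    rw [ih]
    rfl

lemma slice2_none (xs : List Char) :
    PySem.List.slice? xs none none 2 = some (pvEvens xs) := by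
  simp only [PySem.List.slice?, PySem.List.sliceIndices]
  norm_num
  have h1 : (if 0 < xs.length then (((xs.length:Int) + 2 - 1) / 2).toNat else 0) = (xs.length + 1) / 2 := by
    split_ifs with h
    · omega
    · omega
  have h2 : (fun x : Nat => xs[(2 * (x:Int)).toNat]?) = (fun k : Nat => xs[2 * k]?) := by
    funext x
    have hx : (2 * (x:Int)).toNat = 2 * x := by omega
    rw [hx]
  rw [h1, h2, filterMap_range_evens]

lemma slice2_one (xs : List Char) :
    PySem.List.slice? xs (some 1) none 2 = some (pvEvens xs.tail) := by
  cases xs with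
  | nil => decide
  | cons c t =>
    simp only [PySem.List.slice?, PySem.List.sliceIndices]
    norm_num
    have h1 : (if 0 < t.length then (((t.length:Int) + 2 - 1) / 2).toNat else 0) = (t.length + 1) / 2 := by
      split_ifs <;> omega
    have h2 : (fun x : Nat => (c :: t)[(1 + 2 * (x:Int)).toNat]?) = (fun k : Nat => t[2 * k]?) := by
      funext x
      have hx : (1 + 2 * (x:Int)).toNat = 2 * x + 1 := by omega
      rw [hx]
      simp
    rw [h1, h2, filterMap_range_evens]

lemma dv_digit : ∀ d : Nat, d < 10 → pvIntOf (Nat.digitChar d) = (d : Int) := by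
  decide

lemma mem_toDigitsCore : ∀ (fuel n : Nat) (acc : List Char) (c : Char),
    c ∈ Nat.toDigitsCore 10 fuel n acc → c ∈ acc ∨ ∃ d : Nat, d < 10 ∧ c = Nat.digitChar d := by
  intro fuel
  induction fuel with
  | zero => intro n acc c h; exact Or.inl h
  | succ fuel ih =>
    intro n acc c h
    simp only [Nat.toDigitsCore] at h
    split at h
    · rcases List.mem_cons.mp h with h | h
      · exact Or.inr ⟨n % 10, Nat.mod_lt _ (by norm_num), h⟩
      · exact Or.inl h
    · rcases ih _ _ _ h with h | h
      · rcases List.mem_cons.mp h with h | h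
        · exact Or.inr ⟨n % 10, Nat.mod_lt _ (by norm_num), h⟩
        · exact Or.inl h
      · exact Or.inr h

lemma dv_le_of_mem {n : Int} (hn : 0 ≤ n) {c : Char}
    (hc : c ∈ (PySem.Int.toStr n).toList) : pvIntOf c ≤ 9 := by
  have hts : (PySem.Int.toStr n).toList = Nat.toDigits 10 n.toNat := by
    simp [PySem.Int.toList_toStr, PySem.Int.toChars, not_lt.mpr hn]
  rw [hts, Nat.toDigits] at hc
  rcases mem_toDigitsCore _ _ _ _ hc with h | ⟨d, hd, rfl⟩
  · exact absurd h (List.not_mem_nil)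
  · rw [dv_digit d hd]; omega

-- per-character contributions of the two ports, as plain functions
def gA (i : Char) : Int :=
  if pvIntOf i * 2 > 9 then PySem.Int.mod (pvIntOf i * 2) 10 + PySem.Int.floordiv (pvIntOf i * 2) 10
  else pvIntOf i * 2

def gB (p : Int × Char) : Int :=
  if PySem.Int.mod p.1 2 = 0 then
    (if pvIntOf p.2 * 2 > 9 then pvIntOf p.2 * 2 - 9 else pvIntOf p.2 * 2)
  else pvIntOf p.2

lemma contrib_even (c : Char) (h : pvIntOf c ≤ 9) :
    gA c = (if pvIntOf c * 2 > 9 then pvIntOf c * 2 - 9 else pvIntOf c * 2) := by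
  unfold gA
  set d := pvIntOf c with hd
  split_ifs with hx
  · have h1 : PySem.Int.floordiv (d * 2) 10 = 1 := by
      simp only [PySem.Int.floordiv]
      rw [Int.fdiv_eq_ediv]
      omega
    have h2 : PySem.Int.mod (d * 2) 10 = d * 2 - 10 := by
      simp only [PySem.Int.mod]
      rw [Int.fmod_eq_emod]
      omega
    rw [h1, h2]; ring
  · rfl

lemma pvEvens_cons {α : Type} (x : α) (l : List α) :
    pvEvens (x :: l) = x :: pvEvens l.tail := by
  cases l <;> rfl

lemma sum_split : ∀ (l : List Char), (∀ c ∈ l, pvIntOf c ≤ 9) → ∀ (j : Int),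
    ((PySem.List.enumerate l (2 * j)).map gB).sum
    = ((pvEvens l).map gA).sum + ((pvEvens l.tail).map pvIntOf).sum := by
  intro l
  induction l using pvEvens.induct with
  | case1 => intro _ j; simp [pvEvens, PySem.List.enumerate_nil]
  | case2 a =>
    intro hd j
    rw [PySem.List.enumerate_cons, PySem.List.enumerate_nil]
    simp only [pvEvens, List.map_cons, List.map_nil, List.sum_cons, List.sum_nil, List.tail_cons]
    rw [contrib_even a (hd a (by simp))]
    simp [gB]
  | case3 a b r ih =>
    intro hd j
    rw [PySem.List.enumerate_cons, PySem.List.enumerate_cons]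
    have h22 : 2 * j + 1 + 1 = 2 * (j + 1) := by ring
    rw [h22]
    simp only [List.map_cons, List.sum_cons]
    rw [ih (fun c hc => hd c (by simp [hc])) (j + 1)]
    have hga : gB (2 * j, a) = gA a := by
      rw [contrib_even a (hd a (by simp))]
      simp [gB]
    have hgb : gB (2 * j + 1, b) = pvIntOf b := by
      simp [gB]
    rw [hga, hgb]
    simp only [pvEvens_cons a, List.tail_cons, pvEvens_cons b, List.map_cons, List.sum_cons]
    ring

lemma stepA1_eq : (fun (s1 : Int) (i : Char) =>
      let x := pvIntOf i * 2
      if x > 9 then s1 + (PySem.Int.mod x 10 + PySem.Int.floordiv x 10) else s1 + x)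
    = fun s1 i => s1 + gA i := by
  funext s1 i
  simp only [gA]
  split_ifs <;> rfl

lemma stepB_eq : (fun (total : Int) (p : Int × Char) =>
      let d := pvIntOf p.2
      if PySem.Int.mod p.1 2 = 0 then
        let x := d * 2
        total + (if x > 9 then x - 9 else x)
      else
        total + d)
    = fun total p => total + gB p := by
  funext total p
  simp only [gB]
  split_ifs <;> rfl

-- ===== VERDICT (by name: the statement is the Claim_ definition above) =====
theorem f_spec : Claim_equal_f := by
  intro n _ hpre
  unfold Spec_f f f_alt
  rw [slice2_none, slice2_one, stepA1_eq, stepB_eq]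
  simp only [Option.getD_some]
  rw [PySem.List.foldl_add, PySem.List.foldl_add, PySem.List.foldl_add]
  have hall : ∀ c ∈ (PySem.Int.toStr n).toList, pvIntOf c ≤ 9 :=
    fun c hc => dv_le_of_mem hpre hc
  have hs := sum_split (PySem.Int.toStr n).toList hall 0
  rw [mul_zero] at hs
  omega
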